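-- pv_equiv track=rewrite | github.com/berayboztepe/UWR_DataScience | Advanced Python/Exercise_1/Task_5.py | find_common_prefix
-- ===== SOURCE A (Python) =====
-- from string import ascii_lowercase
--
-- def find_common_prefix(words, level=0):
--     longest_prefix = ""
--     for letter in ascii_lowercase:
--         filtered_words = [word for word in words if len(word) > level and word[level] == letter]
--         if len(filtered_words) < 3:
--             continue
--
--         prefix = find_common_prefix(filtered_words, level + 1)
--
--         if len(prefix) + 1 > len(longest_prefix):
--             longest_prefix = letter + prefix
--
--     return longest_prefix
-- ===== SOURCE B (Python) =====
-- from string import ascii_lowercase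
--
-- def find_common_prefix(words, level=0):
--     # One pass: count every lowercase prefix of each word's suffix in a dict,
--     # then pick the longest prefix counted >= 3 times (lex-smallest on ties).
--     lower = set(ascii_lowercase)
--     counts = {}
--     for word in words:
--         p = ""
--         for ch in word[level:]:
--             if ch not in lower:
--                 break
--             p += ch
--             counts[p] = counts.get(p, 0) + 1
--     best = ""
--     for p, c in counts.items():
--         if c >= 3 and (len(p) > len(best) or (len(p) == len(best) and p < best)):
--             best = p
--     return best
-- ===== Notes on version B (the rewrite author's own statement) =====
-- stated objective: faster
-- what changed: A recursively scans the whole word list 26 times per trie node (one filter pass per letter, building new lists at every level); B makes a single pass over the words, counting every lowercase prefix of each word's suffix in one dict, and then selects the longest (lex-smallest on ties) prefix counted at least 3 times.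
-- outside the precondition, e.g. on find_common_prefix(['ab', 'ab', 'ab'], -1): A returns 'bab', B returns 'b'; on find_common_prefix(['', 'ab', 'ab'], -1): A raises IndexError, B returns ''
import Mathlib
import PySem

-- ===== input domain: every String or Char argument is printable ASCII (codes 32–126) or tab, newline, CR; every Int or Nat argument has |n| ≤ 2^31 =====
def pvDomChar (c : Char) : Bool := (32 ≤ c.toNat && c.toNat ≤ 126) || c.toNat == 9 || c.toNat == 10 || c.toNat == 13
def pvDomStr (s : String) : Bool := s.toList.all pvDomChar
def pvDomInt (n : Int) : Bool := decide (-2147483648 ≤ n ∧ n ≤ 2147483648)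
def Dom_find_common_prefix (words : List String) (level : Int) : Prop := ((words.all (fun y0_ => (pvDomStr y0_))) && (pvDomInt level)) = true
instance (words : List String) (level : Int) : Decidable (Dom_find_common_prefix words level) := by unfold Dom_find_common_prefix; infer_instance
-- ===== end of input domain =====

-- B replaces A's 26-way recursive filtering with one pass that counts every lowercase
-- prefix in a dict and then selects the longest (lex-smallest) prefix counted >= 3 times.

-- ===== PORT A =====
def pvAscii : List Char := "abcdefghijklmnopqrstuvwxyz".toList

def pvMaxLen (ws : List String) : Int := ws.foldl (fun m w => max m (PySem.Str.len w)) 0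

-- upper bound for the running-max fold (used only by the termination argument of pvALoop)
theorem pvFoldlMaxLe (xs : List String) (init B : Int) (h0 : init ≤ B)
    (h : ∀ x ∈ xs, PySem.Str.len x ≤ B) :
    xs.foldl (fun m w => max m (PySem.Str.len w)) init ≤ B := by
  induction xs generalizing init with
  | nil => exact h0
  | cons a t ih =>
    simp only [List.foldl_cons]
    exact ih _ (max_le h0 (h a (by simp))) (fun x hx => h x (by simp [hx]))

def pvFilt (words : List String) (level : Int) (c : Char) : List String :=
  words.filter (fun w =>
    decide (level < PySem.Str.len w) && (PySem.Str.pyGet? w level == some c))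

theorem pvMeasure_lt (words : List String) (level : Int) (c : Char)
    (h : ¬ (pvFilt words level c).length < 3) :
    (pvMaxLen (pvFilt words level c) - (level + 1)).toNat < (pvMaxLen words - level).toNat := by
  have hne : pvFilt words level c ≠ [] := by
    intro hnil; rw [hnil] at h; simp at h
  obtain ⟨w, hw⟩ := List.exists_mem_of_ne_nil _ hne
  have hwf := List.mem_filter.mp hw
  have hlev : level < PySem.Str.len w := by
    have := hwf.2
    simp only [Bool.and_eq_true, decide_eq_true_eq] at this
    exact this.1
  have h1 : PySem.Str.len w ≤ pvMaxLen (pvFilt words level c) :=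
    (PySem.List.le_foldl_max_int (pvFilt words level c) PySem.Str.len 0).2 w hw
  have h2 : pvMaxLen (pvFilt words level c) ≤ pvMaxLen words := by
    refine pvFoldlMaxLe _ 0 (pvMaxLen words)
      ((PySem.List.le_foldl_max_int words PySem.Str.len 0).1) (fun x hx => ?_)
    exact (PySem.List.le_foldl_max_int words PySem.Str.len 0).2 x (List.mem_filter.mp hx).1
  omega

def pvALoop : List String → Int → List Char → String → String
  | _, _, [], longest => longest
  | words, level, c :: rest, longest =>
    if (pvFilt words level c).length < 3 then pvALoop words level rest longest
    else
      let pfx := pvALoop (pvFilt words level c) (level + 1) pvAscii ""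
      if PySem.Str.len longest < PySem.Str.len pfx + 1
      then pvALoop words level rest (String.ofList (c :: pfx.toList))
      else pvALoop words level rest longest
termination_by words level letters _ => ((pvMaxLen words - level).toNat, letters.length)
decreasing_by
  · exact Prod.Lex.right _ (Nat.lt_succ_self _)
  · exact Prod.Lex.left _ _ (pvMeasure_lt words level c (by assumption))
  · exact Prod.Lex.right _ (Nat.lt_succ_self _)
  · exact Prod.Lex.right _ (Nat.lt_succ_self _)

def find_common_prefix (words : List String) (level : Int) : String :=
  pvALoop words level pvAscii ""

-- ===== PORT B =====
def pvLowerSet : PySem.Set Char := PySem.Set.ofList pvAscii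

-- inner loop of B: walk the suffix's chars, extending p and counting each prefix
def pvBWord : PySem.Dict String Int → List Char → List Char → PySem.Dict String Int
  | counts, [], _ => counts
  | counts, ch :: rest, p =>
    if PySem.Set.contains pvLowerSet ch then
      pvBWord (counts.insert (String.ofList (p ++ [ch]))
        (counts.getD (String.ofList (p ++ [ch])) 0 + 1)) rest (p ++ [ch])
    else counts

-- Python's string 'p < best' is lexicographic code-point comparison = '<' on the char lists
def pvStepB (best : String) (pc : String × Int) : String :=
  if 3 ≤ pc.2 ∧ (PySem.Str.len best < PySem.Str.len pc.1 ∨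
      (PySem.Str.len pc.1 = PySem.Str.len best ∧ pc.1.toList < best.toList))
  then pc.1 else best

def pvBCounts (words : List String) (level : Int) : PySem.Dict String Int :=
  words.foldl (fun d w => pvBWord d (PySem.Str.slice w (some level) none).toList []) PySem.Dict.empty

def find_common_prefix_alt (words : List String) (level : Int) : String :=
  (pvBCounts words level).items.foldl pvStepB ""

-- ===== PRECONDITION & SPEC =====
-- Pre_ excludes negative level: level is a recursion depth (0 at every external call), and a
-- negative level makes Python A read word[level] by negative-index wraparound (IndexError on
-- words shorter than |level|, and on other inputs a value mixing end-of-word with start-of-word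
-- characters) — outside the function's natural domain.
def Pre_find_common_prefix (words : List String) (level : Int) : Prop := 0 ≤ level
instance (words : List String) (level : Int) : Decidable (Pre_find_common_prefix words level) := by
  unfold Pre_find_common_prefix; infer_instance

def pvWitness_find_common_prefix : List String × Int := (["abc", "abd", "abe"], 0)

def Spec_find_common_prefix (words : List String) (level : Int) (out : String) : Prop :=
  out = find_common_prefix_alt words level
instance (words : List String) (level : Int) (out : String) :
    Decidable (Spec_find_common_prefix words level out) := by
  unfold Spec_find_common_prefix; infer_instance

-- ===== CLAIM (what is proved, stated in full; the proofs are below) =====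
def Claim_equal_find_common_prefix : Prop := ∀ (words : List String) (level : Int), Dom_find_common_prefix words level → Pre_find_common_prefix words level → Spec_find_common_prefix words level (find_common_prefix words level)

-- ===== LEMMAS AND PROOFS =====

def pvIsLow (c : Char) : Bool := PySem.Set.contains pvLowerSet c
def pvRun (l : List Char) : List Char := l.takeWhile pvIsLow
def pvSuf (w : String) (level : Int) : List Char := pvRun (w.toList.drop level.toNat)
def pvCnt (words : List String) (level : Int) (p : List Char) : Nat :=
  words.countP (fun w => p.isPrefixOf (pvSuf w level))
def pvGood (words : List String) (level : Int) (p : List Char) : Prop :=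
  p ≠ [] ∧ 3 ≤ pvCnt words level p
def pvLtP (p q : List Char) : Prop :=
  q.length < p.length ∨ (p.length = q.length ∧ p < q)
def pvIsBest (words : List String) (level : Int) (r : List Char) : Prop :=
  (r = [] ∨ pvGood words level r) ∧ ∀ p, pvGood words level p → ¬ pvLtP p r

theorem pvLtP_irrefl (p : List Char) : ¬ pvLtP p p := by
  simp [pvLtP]

theorem pvLtP_trans {a b c : List Char} (h1 : pvLtP a b) (h2 : pvLtP b c) : pvLtP a c := by
  rcases h1 with h1 | ⟨h1, h1'⟩ <;> rcases h2 with h2 | ⟨h2, h2'⟩ <;>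
    simp [pvLtP] <;> first | omega | (left; omega) |
      (right; exact ⟨by omega, lt_trans h1' h2'⟩)

theorem pvLtP_eq_of_not {p q : List Char} (h1 : ¬ pvLtP p q) (h2 : ¬ pvLtP q p) : p = q := by
  simp only [pvLtP, not_or, not_and] at h1 h2
  have hlen : p.length = q.length := by omega
  rcases lt_trichotomy p q with h | h | h
  · exact absurd h (h1.2 hlen)
  · exact h
  · exact absurd h (h2.2 hlen.symm)

theorem pvBest_unique {words : List String} {level : Int} {r1 r2 : List Char}
    (h1 : pvIsBest words level r1) (h2 : pvIsBest words level r2) : r1 = r2 := by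
  have ne_lt : ∀ r : List Char, r ≠ [] → pvLtP r [] := by
    intro r hr
    left
    simpa using List.length_pos_iff.mpr hr
  rcases h1.1 with e1 | g1
  · rcases h2.1 with e2 | g2
    · rw [e1, e2]
    · exact absurd (ne_lt r2 g2.1) (by rw [← e1]; exact h1.2 r2 g2)
  · rcases h2.1 with e2 | g2
    · exact absurd (ne_lt r1 g1.1) (by rw [← e2]; exact h2.2 r1 g1)
    · exact pvLtP_eq_of_not (h2.2 r1 g1) (h1.2 r2 g2)

-- ---- A-side ----

def pvStepA (words : List String) (level : Int) (b : String) (c : Char) : String :=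
  if (pvFilt words level c).length < 3 then b
  else if PySem.Str.len b <
      PySem.Str.len (find_common_prefix (pvFilt words level c) (level + 1)) + 1
    then String.ofList (c :: (find_common_prefix (pvFilt words level c) (level + 1)).toList)
    else b

theorem pvALoop_eq_foldl (words : List String) (level : Int) (letters : List Char)
    (longest : String) :
    pvALoop words level letters longest = letters.foldl (pvStepA words level) longest := by
  induction letters generalizing longest with
  | nil => rw [pvALoop]; rfl
  | cons c rest ih =>
    rw [pvALoop]
    simp only [List.foldl_cons, pvStepA, find_common_prefix]
    split_ifs <;> apply ih

theorem pvIsLow_iff (c : Char) : pvIsLow c = true ↔ c ∈ pvAscii := by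
  simp [pvIsLow, pvLowerSet, PySem.Set.contains, PySem.Set.mem_ofList]

theorem pvFilt_pred (level : Int) (c : Char) (w : String) (hlev : 0 ≤ level)
    (hc : c ∈ pvAscii) :
    (decide (level < PySem.Str.len w) && (PySem.Str.pyGet? w level == some c)) =
      [c].isPrefixOf (pvSuf w level) := by
  rw [PySem.Str.len_eq, pvSuf, pvRun]
  have hget : PySem.Str.pyGet? w level = w.toList[level.toNat]? := by
    simp [PySem.Str.pyGet?, PySem.List.pyGet?_of_nonneg _ hlev]
  rw [hget]
  by_cases hlt : level.toNat < w.toList.length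
  · have h1 : decide (level < (w.toList.length : Int)) = true :=
      decide_eq_true (by omega)
    rw [h1, List.drop_eq_getElem_cons hlt, List.getElem?_eq_getElem hlt,
      List.takeWhile_cons]
    by_cases heq : w.toList[level.toNat] = c
    · rw [heq]
      rw [(pvIsLow_iff c).mpr hc]
      simp [List.isPrefixOf]
    · by_cases hl : pvIsLow w.toList[level.toNat] = true
      · simp [hl, List.isPrefixOf, heq, Ne.symm heq]
      · simp [Bool.not_eq_true] at hl
        simp [hl, List.isPrefixOf, heq]
  · have h0 : decide (level < (w.toList.length : Int)) = false :=
      decide_eq_false (by omega)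
    have hle : w.toList.length ≤ level.toNat := by omega
    rw [h0, List.drop_of_length_le hle, List.getElem?_eq_none hle]
    simp

theorem pvFilt_length (words : List String) (level : Int) (c : Char) (hlev : 0 ≤ level)
    (hc : c ∈ pvAscii) :
    (pvFilt words level c).length = pvCnt words level [c] := by
  rw [pvFilt, pvCnt, List.countP_eq_length_filter]
  congr 1
  exact List.filter_congr (fun w _ => pvFilt_pred level c w hlev hc)

theorem pvSuf_succ_pred (w : String) (level : Int) (hlev : 0 ≤ level) (c : Char)
    (t : List Char) :
    (c :: t).isPrefixOf (pvSuf w level) =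
      ([c].isPrefixOf (pvSuf w level) && t.isPrefixOf (pvSuf w (level + 1))) := by
  have h1 : (level + 1).toNat = level.toNat + 1 := by omega
  rw [pvSuf, pvSuf, pvRun, pvRun, h1]
  by_cases hlt : level.toNat < w.toList.length
  · rw [List.drop_eq_getElem_cons hlt, List.takeWhile_cons]
    by_cases hl : pvIsLow w.toList[level.toNat] = true
    · rw [hl]
      simp only [if_true]
      by_cases heq : c = w.toList[level.toNat]
      · simp [List.isPrefixOf, heq]
      · simp [List.isPrefixOf, heq]
    · simp only [Bool.not_eq_true] at hl
      simp [hl]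
  · rw [List.drop_of_length_le (by omega), List.drop_of_length_le (by omega)]
    simp

theorem pvCnt_cons (words : List String) (level : Int) (c : Char) (t : List Char)
    (hlev : 0 ≤ level) (hc : c ∈ pvAscii) :
    pvCnt (pvFilt words level c) (level + 1) t = pvCnt words level (c :: t) := by
  rw [pvCnt, pvCnt, pvFilt, List.countP_filter]
  apply List.countP_congr
  intro w _
  rw [pvFilt_pred level c w hlev hc, pvSuf_succ_pred w level hlev c t]
  all_goals rw [Bool.and_comm]

theorem pvCnt_mono (words : List String) (level : Int) {p q : List Char} (h : p <+: q) :
    pvCnt words level q ≤ pvCnt words level p := by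
  apply List.countP_mono_left
  intro w _ hw
  rw [List.isPrefixOf_iff_prefix] at *
  exact h.trans hw

theorem pvGood_head (words : List String) (level : Int) (p : List Char)
    (h : pvGood words level p) : ∃ c t, p = c :: t ∧ c ∈ pvAscii := by
  obtain ⟨hne, hcnt⟩ := h
  obtain ⟨c, t, rfl⟩ : ∃ c t, p = c :: t := by
    cases p with
    | nil => exact absurd rfl hne
    | cons c t => exact ⟨c, t, rfl⟩
  refine ⟨c, t, rfl, ?_⟩
  have hpos : 0 < pvCnt words level (c :: t) := by omega
  rw [pvCnt, List.countP_pos_iff] at hpos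
  obtain ⟨w, _, hw⟩ := hpos
  rw [List.isPrefixOf_iff_prefix] at hw
  obtain ⟨r, hr⟩ := hw
  have hmem : c ∈ pvSuf w level := by rw [← hr]; simp
  exact (pvIsLow_iff c).mp (List.mem_takeWhile_imp hmem)

theorem pvAscii_sorted : pvAscii.Pairwise (· < ·) := by decide

theorem pvFoldA (words : List String) (level : Int) (hlev : 0 ≤ level)
    (IH : ∀ c ∈ pvAscii, ¬ (pvFilt words level c).length < 3 →
      pvIsBest (pvFilt words level c) (level + 1)
        ((find_common_prefix (pvFilt words level c) (level + 1)).toList)) :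
    ∀ (letters done : List Char) (b : String), done ++ letters = pvAscii →
    (b.toList = [] ∨ (pvGood words level b.toList ∧ ∃ d ∈ done, ∃ t, b.toList = d :: t)) →
    (∀ p, pvGood words level p → (∃ d ∈ done, ∃ t, p = d :: t) → ¬ pvLtP p b.toList) →
    ((letters.foldl (pvStepA words level) b).toList = [] ∨
      pvGood words level (letters.foldl (pvStepA words level) b).toList) ∧
    (∀ p, pvGood words level p → (∃ d ∈ done ++ letters, ∃ t, p = d :: t) →
      ¬ pvLtP p (letters.foldl (pvStepA words level) b).toList) := by
  intro letters
  induction letters with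
  | nil =>
    intro done b hAsc hb hinv
    refine ⟨?_, ?_⟩
    · rcases hb with h | ⟨hg, _⟩
      · exact Or.inl h
      · exact Or.inr hg
    · intro p hp hd
      rw [List.append_nil] at hd
      exact hinv p hp hd
  | cons c rest ihl =>
    intro done b hAsc hb hinv
    have hc : c ∈ pvAscii := by
      rw [← hAsc]; exact List.mem_append_right _ List.mem_cons_self
    have hdc : ∀ d ∈ done, d < c := by
      have hpw := pvAscii_sorted
      rw [← hAsc, List.pairwise_append] at hpw
      exact fun d hd => hpw.2.2 d hd c List.mem_cons_self
    have hAsc' : (done ++ [c]) ++ rest = pvAscii := by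
      rw [List.append_assoc, List.singleton_append]; exact hAsc
    rw [List.foldl_cons]
    have hconcl : done ++ c :: rest = (done ++ [c]) ++ rest := by
      rw [List.append_assoc, List.singleton_append]
    rw [hconcl]
    by_cases hlen3 : (pvFilt words level c).length < 3
    · have hstep : pvStepA words level b c = b := by rw [pvStepA, if_pos hlen3]
      rw [hstep]
      have hnogood : ∀ t, ¬ pvGood words level (c :: t) := by
        intro t hg
        have h1 : pvCnt words level (c :: t) ≤ pvCnt words level [c] :=
          pvCnt_mono words level ⟨t, rfl⟩
        rw [← pvFilt_length words level c hlev hc] at h1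
        have := hg.2
        omega
      apply ihl (done ++ [c]) b hAsc'
      · rcases hb with h | ⟨hg, d, hd, t, ht⟩
        · exact Or.inl h
        · exact Or.inr ⟨hg, d, List.mem_append_left _ hd, t, ht⟩
      · intro p hp hd
        obtain ⟨d, hd, t, rfl⟩ := hd
        rcases List.mem_append.mp hd with hd | hd
        · exact hinv _ hp ⟨d, hd, t, rfl⟩
        · rw [List.mem_singleton] at hd
          rw [hd] at hp
          exact absurd hp (hnogood t)
    · have hbest := IH c hc hlen3
      set Ac := find_common_prefix (pvFilt words level c) (level + 1) with hAcdef
      have hmgood : pvGood words level (c :: Ac.toList) := by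
        refine ⟨by simp, ?_⟩
        rw [← pvCnt_cons words level c Ac.toList hlev hc]
        rcases hbest.1 with h | hg
        · rw [h, pvCnt]
          have : (pvFilt words level c).countP
              (fun w => [].isPrefixOf (pvSuf w (level + 1))) =
              (pvFilt words level c).length := by
            rw [List.countP_eq_length]
            intro w _
            simp [List.isPrefixOf]
          omega
        · exact hg.2
      have hmmin : ∀ p, pvGood words level p → (∃ t, p = c :: t) →
          ¬ pvLtP p (c :: Ac.toList) := by
        rintro p hp ⟨t, rfl⟩
        have hcnt : 3 ≤ pvCnt (pvFilt words level c) (level + 1) t := by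
          rw [pvCnt_cons words level c t hlev hc]
          exact hp.2
        cases t with
        | nil =>
          intro hlt
          rcases hlt with hlt | ⟨hlen, hlex⟩
          · simp at hlt
          · have hnil : Ac.toList = [] := by
              simp only [List.length_cons, List.length_nil] at hlen
              have h0 : Ac.toList.length = 0 := by omega
              simpa using h0
            rw [hnil] at hlex
            exact absurd hlex (lt_irrefl _)
        | cons x t' =>
          have hgt : pvGood (pvFilt words level c) (level + 1) (x :: t') :=
            ⟨by simp, hcnt⟩
          have hnt := hbest.2 _ hgt
          intro hlt
          apply hnt
          rcases hlt with hlt | ⟨hlen, hlex⟩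
          · exact Or.inl (by simpa using hlt)
          · refine Or.inr ⟨by simpa using hlen, ?_⟩
            rw [List.cons_lt_cons_iff] at hlex
            rcases hlex with h | ⟨_, h⟩
            · exact absurd h (lt_irrefl _)
            · exact h
      have hstep : pvStepA words level b c =
          if PySem.Str.len b < PySem.Str.len Ac + 1
          then String.ofList (c :: Ac.toList) else b := by
        rw [pvStepA, if_neg hlen3]
      by_cases hup : PySem.Str.len b < PySem.Str.len Ac + 1
      · have hb' : pvStepA words level b c = String.ofList (c :: Ac.toList) := by
          rw [hstep, if_pos hup]
        have hblen : b.toList.length < (c :: Ac.toList).length := by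
          rw [PySem.Str.len_eq, PySem.Str.len_eq] at hup
          simp only [List.length_cons]
          omega
        rw [hb']
        apply ihl (done ++ [c]) _ hAsc'
        · refine Or.inr ⟨by rw [String.toList_ofList]; exact hmgood,
            c, List.mem_append_right _ List.mem_cons_self, Ac.toList, ?_⟩
          rw [String.toList_ofList]
        · intro p hp hd
          rw [String.toList_ofList]
          obtain ⟨d, hd, t, rfl⟩ := hd
          rcases List.mem_append.mp hd with hd | hd
          · have hold := hinv _ hp ⟨d, hd, t, rfl⟩
            have hple : (d :: t).length ≤ b.toList.length := by
              rcases Nat.lt_or_ge b.toList.length (d :: t).length with h | h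
              · exact absurd (Or.inl h) hold
              · exact h
            intro hlt
            rcases hlt with hlt | ⟨hlen, _⟩
            · omega
            · omega
          · rw [List.mem_singleton] at hd
            rw [hd] at hp ⊢
            exact hmmin _ hp ⟨t, rfl⟩
      · have hb' : pvStepA words level b c = b := by rw [hstep, if_neg hup]
        rw [hb']
        apply ihl (done ++ [c]) b hAsc'
        · rcases hb with h | ⟨hg, d, hd, t, ht⟩
          · exact Or.inl h
          · exact Or.inr ⟨hg, d, List.mem_append_left _ hd, t, ht⟩
        · intro p hp hd
          obtain ⟨d, hd, t, rfl⟩ := hd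
          rcases List.mem_append.mp hd with hd | hd
          · exact hinv _ hp ⟨d, hd, t, rfl⟩
          · rw [List.mem_singleton] at hd
            rw [hd] at hp ⊢
            have hnm := hmmin _ hp ⟨t, rfl⟩
            have hple : (c :: t).length ≤ (c :: Ac.toList).length := by
              rcases Nat.lt_or_ge (c :: Ac.toList).length (c :: t).length with h | h
              · exact absurd (Or.inl h) hnm
              · exact h
            have hmb : (c :: Ac.toList).length ≤ b.toList.length := by
              rw [PySem.Str.len_eq, PySem.Str.len_eq] at hup
              simp only [List.length_cons]
              omega
            intro hlt
            rcases hlt with hlt | ⟨hlen, hlex⟩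
            · omega
            · -- equal lengths: b starts with an earlier letter d0 < c
              rcases hb with hbe | ⟨_, d0, hd0, tb, htb⟩
              · rw [hbe] at hlen
                simp at hlen
              · rw [htb] at hlex
                have hd0c : d0 < c := hdc d0 hd0
                have : b.toList < c :: t := by
                  rw [htb, List.cons_lt_cons_iff]
                  exact Or.inl hd0c
                rw [htb] at this
                exact absurd hlex (lt_asymm this)

theorem pvA_best (n : Nat) (words : List String) (level : Int) (hlev : 0 ≤ level)
    (hn : (pvMaxLen words - level).toNat ≤ n) :
    pvIsBest words level ((find_common_prefix words level).toList) := by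
  induction n using Nat.strong_induction_on generalizing words level with
  | _ n ihn =>
  have hIH : ∀ c ∈ pvAscii, ¬ (pvFilt words level c).length < 3 →
      pvIsBest (pvFilt words level c) (level + 1)
        ((find_common_prefix (pvFilt words level c) (level + 1)).toList) := by
    intro c _ h3
    have hm := pvMeasure_lt words level c h3
    exact ihn ((pvMaxLen (pvFilt words level c) - (level + 1)).toNat) (by omega)
      (pvFilt words level c) (level + 1) (by omega) le_rfl
  have heq : find_common_prefix words level = pvAscii.foldl (pvStepA words level) "" := by
    rw [find_common_prefix, pvALoop_eq_foldl]
  obtain ⟨h1, h2⟩ := pvFoldA words level hlev hIH pvAscii [] "" rfl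
    (Or.inl (by simp)) (by rintro p _ ⟨d, hd, _⟩; simp at hd)
  rw [heq]
  refine ⟨h1, ?_⟩
  intro p hp
  obtain ⟨c, t, rfl, hc⟩ := pvGood_head words level p hp
  exact h2 _ hp ⟨c, by simpa using hc, t, rfl⟩

-- ---- B-side ----

def pvC (p cs k : List Char) : Bool :=
  p.isPrefixOf k && !(p == k) && k.isPrefixOf (p ++ pvRun cs)

theorem pvC_iff (p cs k : List Char) :
    pvC p cs k = true ↔ (p <+: k ∧ p ≠ k ∧ k <+: (p ++ pvRun cs)) := by
  simp [pvC, List.isPrefixOf_iff_prefix, and_assoc]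

theorem pvC_not_of_run_nil {p cs k : List Char} (h : pvRun cs = []) : pvC p cs k = false := by
  rw [← Bool.not_eq_true, pvC_iff]
  rintro ⟨h1, h2, h3⟩
  rw [h, List.append_nil] at h3
  obtain ⟨t1, rfl⟩ := h1
  have := h3.length_le
  simp at this
  simp [this] at h2

theorem pvC_self (q cs : List Char) : pvC q cs q = false := by
  simp [pvC]

theorem pvRun_cons_low {ch : Char} (rest : List Char) (hl : pvIsLow ch = true) :
    pvRun (ch :: rest) = ch :: pvRun rest := by
  simp [pvRun, hl]

theorem pvRun_cons_notlow {ch : Char} (rest : List Char) (hl : pvIsLow ch = false) :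
    pvRun (ch :: rest) = [] := by
  simp [pvRun, hl]

theorem pvC_cons_split {ch : Char} (rest p k : List Char) (hl : pvIsLow ch = true) :
    pvC p (ch :: rest) k = true ↔ (k = p ++ [ch] ∨ pvC (p ++ [ch]) rest k = true) := by
  rw [pvC_iff, pvC_iff, pvRun_cons_low rest hl]
  constructor
  · rintro ⟨⟨u, rfl⟩, h2, h3⟩
    have hu : u ≠ [] := by rintro rfl; simp at h2
    obtain ⟨x, u', rfl⟩ : ∃ x u', u = x :: u' := by
      cases u with
      | nil => exact absurd rfl hu
      | cons x u' => exact ⟨x, u', rfl⟩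
    rw [List.prefix_append_right_inj, List.cons_prefix_cons] at h3
    obtain ⟨rfl, h3'⟩ := h3
    cases u' with
    | nil => exact Or.inl rfl
    | cons y u'' =>
      refine Or.inr ⟨⟨y :: u'', by simp⟩, ?_, ?_⟩
      · intro hek
        have := congrArg List.length hek
        simp at this
      · rw [List.append_assoc, List.singleton_append, List.prefix_append_right_inj,
          List.cons_prefix_cons]
        exact ⟨rfl, h3'⟩
  · rintro (rfl | ⟨h1, h2, h3⟩)
    · refine ⟨⟨[ch], rfl⟩, ?_, ?_⟩
      · intro he
        have := congrArg List.length he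
        simp at this
      · rw [List.prefix_append_right_inj]
        exact ⟨pvRun rest, rfl⟩
    · refine ⟨(List.prefix_append p [ch]).trans h1, ?_, ?_⟩
      · intro he
        have hle := h1.length_le
        rw [← he] at hle
        simp at hle
      · rw [List.append_assoc, List.singleton_append] at h3
        exact h3
  
theorem pvKey_eq (k : String) (l : List Char) (h : k.toList = l) :
    k = String.ofList l := by
  rw [← String.toList_inj, String.toList_ofList, h]

theorem pvBWord_getD (cs p : List Char) (d : PySem.Dict String Int) (k : String) :
    (pvBWord d cs p).getD k 0 = d.getD k 0 + (if pvC p cs k.toList = true then 1 else 0) := by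
  induction cs generalizing d p with
  | nil =>
    rw [pvBWord, pvC_not_of_run_nil rfl]
    simp
  | cons ch rest ih =>
    rw [pvBWord]
    by_cases hl : pvIsLow ch = true
    · rw [if_pos (show pvLowerSet.contains ch = true from hl)]
      rw [ih]
      by_cases heq : k.toList = p ++ [ch]
      · have hk : k = String.ofList (p ++ [ch]) := pvKey_eq k _ heq
        rw [PySem.Dict.getD_insert]
        rw [if_pos hk]
        have hC1 : pvC p (ch :: rest) k.toList = true :=
          (pvC_cons_split rest p k.toList hl).mpr (Or.inl heq)
        have hC2 : pvC (p ++ [ch]) rest k.toList = false := by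
          rw [heq]; exact pvC_self _ _
        rw [hC1, hC2, hk]
        simp
      · have hk : ¬ k = String.ofList (p ++ [ch]) := by
          intro h; rw [← String.toList_inj, String.toList_ofList] at h; exact heq h
        rw [PySem.Dict.getD_insert, if_neg hk]
        have : pvC p (ch :: rest) k.toList = pvC (p ++ [ch]) rest k.toList := by
          rcases Bool.eq_false_or_eq_true (pvC (p ++ [ch]) rest k.toList) with h | h
          · rw [h]
            exact (pvC_cons_split rest p k.toList hl).mpr (Or.inr h)
          · rw [h, ← Bool.not_eq_true, pvC_cons_split rest p k.toList hl]
            rw [← Bool.not_eq_true] at h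
            tauto
        rw [this]
    · rw [Bool.not_eq_true] at hl
      have hl' : ¬ (pvLowerSet.contains ch = true) := by
        rw [show pvLowerSet.contains ch = pvIsLow ch from rfl, hl]; simp
      rw [if_neg hl', pvC_not_of_run_nil (pvRun_cons_notlow rest hl)]
      simp

theorem pvBWord_contains (cs p : List Char) (d : PySem.Dict String Int) (k : String) :
    (pvBWord d cs p).contains k = (d.contains k || pvC p cs k.toList) := by
  induction cs generalizing d p with
  | nil =>
    rw [pvBWord, pvC_not_of_run_nil rfl]
    simp
  | cons ch rest ih =>
    rw [pvBWord]
    by_cases hl : pvIsLow ch = true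
    · rw [if_pos (show pvLowerSet.contains ch = true from hl), ih,
        PySem.Dict.contains_insert]
      by_cases heq : k.toList = p ++ [ch]
      · have hk : k = String.ofList (p ++ [ch]) := pvKey_eq k _ heq
        have hC1 : pvC p (ch :: rest) k.toList = true :=
          (pvC_cons_split rest p k.toList hl).mpr (Or.inl heq)
        rw [hC1]
        simp [hk]
      · have hk : (k == String.ofList (p ++ [ch])) = false := by
          simp only [beq_eq_false_iff_ne, ne_eq]
          intro h; rw [← String.toList_inj, String.toList_ofList] at h; exact heq h
        rw [hk]
        have : pvC p (ch :: rest) k.toList = pvC (p ++ [ch]) rest k.toList := by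
          rcases Bool.eq_false_or_eq_true (pvC (p ++ [ch]) rest k.toList) with h | h
          · rw [h]
            exact (pvC_cons_split rest p k.toList hl).mpr (Or.inr h)
          · rw [h, ← Bool.not_eq_true, pvC_cons_split rest p k.toList hl]
            rw [← Bool.not_eq_true] at h
            tauto
        rw [this]
        simp
    · rw [Bool.not_eq_true] at hl
      have hl' : ¬ (pvLowerSet.contains ch = true) := by
        rw [show pvLowerSet.contains ch = pvIsLow ch from rfl, hl]; simp
      rw [if_neg hl', pvC_not_of_run_nil (pvRun_cons_notlow rest hl)]
      simp

theorem pvBWord_nodup (cs p : List Char) (d : PySem.Dict String Int)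
    (h : d.keys.Nodup) : (pvBWord d cs p).keys.Nodup := by
  induction cs generalizing d p with
  | nil => exact h
  | cons ch rest ih =>
    rw [pvBWord]
    split
    · exact ih _ _ (PySem.Dict.nodup_keys_insert _ _ _ h)
    · exact h

theorem pvSlice_toList (w : String) (level : Int) (hlev : 0 ≤ level) :
    (PySem.Str.slice w (some level) none).toList = w.toList.drop level.toNat := by
  simp [PySem.Str.slice]
  rw [show (some level : Option Int) = some ((level.toNat : Nat) : Int) by
      simp; omega,
    PySem.List.slice_from_natCast]

theorem pvC_nil_iff (cs k : List Char) : pvC [] cs k = true ↔ (k ≠ [] ∧ k <+: pvRun cs) := by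
  rw [pvC_iff]
  constructor
  · rintro ⟨_, h2, h3⟩
    exact ⟨fun hk => h2 hk.symm, by simpa using h3⟩
  · rintro ⟨h1, h2⟩
    exact ⟨List.nil_prefix, fun hk => h1 hk.symm, by simpa using h2⟩

theorem pvBCounts_getD_gen (words : List String) (level : Int)
    (d : PySem.Dict String Int) (k : String) :
    ((words.foldl (fun d w => pvBWord d (PySem.Str.slice w (some level) none).toList []) d).getD k 0)
      = d.getD k 0 +
        (words.countP (fun w => pvC [] ((PySem.Str.slice w (some level) none).toList) k.toList) : Int) := by
  induction words generalizing d with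
  | nil => simp
  | cons w rest ih =>
    rw [List.foldl_cons, ih, pvBWord_getD, List.countP_cons]
    by_cases h : pvC [] ((PySem.Str.slice w (some level) none).toList) k.toList = true
    · rw [h]
      simp
      omega
    · rw [Bool.not_eq_true] at h
      rw [h]
      simp

theorem pvBCounts_contains_gen (words : List String) (level : Int)
    (d : PySem.Dict String Int) (k : String) :
    ((words.foldl (fun d w => pvBWord d (PySem.Str.slice w (some level) none).toList []) d).contains k)
      = (d.contains k ||
        words.any (fun w => pvC [] ((PySem.Str.slice w (some level) none).toList) k.toList)) := by
  induction words generalizing d with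
  | nil => simp
  | cons w rest ih =>
    rw [List.foldl_cons, ih, pvBWord_contains, List.any_cons]
    by_cases h : pvC [] ((PySem.Str.slice w (some level) none).toList) k.toList = true <;>
      simp [h] at * <;> simp [Bool.or_assoc]

theorem pvC_slice_iff (w : String) (level : Int) (hlev : 0 ≤ level) (k : List Char)
    (hk : k ≠ []) :
    pvC [] ((PySem.Str.slice w (some level) none).toList) k = k.isPrefixOf (pvSuf w level) := by
  rw [pvSlice_toList w level hlev]
  rcases Bool.eq_false_or_eq_true (k.isPrefixOf (pvSuf w level)) with h | h <;> rw [h]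
  · rw [pvC_nil_iff]
    rw [List.isPrefixOf_iff_prefix] at h
    exact ⟨hk, h⟩
  · rw [← Bool.not_eq_true, pvC_nil_iff]
    rw [← Bool.not_eq_true, List.isPrefixOf_iff_prefix] at h
    exact fun hc => h hc.2

theorem pvDfin_getD (words : List String) (level : Int) (hlev : 0 ≤ level) (k : String)
    (hk : k.toList ≠ []) : (pvBCounts words level).getD k 0 = pvCnt words level k.toList := by
  rw [pvBCounts, pvBCounts_getD_gen, pvCnt]
  rw [List.countP_congr (fun w _ => by rw [pvC_slice_iff w level hlev k.toList hk])]
  simp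

theorem pvDfin_contains (words : List String) (level : Int) (hlev : 0 ≤ level) (k : String) :
    (pvBCounts words level).contains k = true ↔
      (k.toList ≠ [] ∧ 1 ≤ pvCnt words level k.toList) := by
  rw [pvBCounts, pvBCounts_contains_gen]
  simp only [PySem.Dict.contains_empty, Bool.false_or, List.any_eq_true]
  constructor
  · rintro ⟨w, hw, hC⟩
    have hk : k.toList ≠ [] := by
      rw [pvC_nil_iff] at hC
      exact hC.1
    refine ⟨hk, ?_⟩
    rw [pvCnt, Nat.one_le_iff_ne_zero, ← Nat.pos_iff_ne_zero, List.countP_pos_iff]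
    exact ⟨w, hw, by rw [← pvC_slice_iff w level hlev k.toList hk]; exact hC⟩
  · rintro ⟨hk, hcnt⟩
    rw [pvCnt, Nat.one_le_iff_ne_zero, ← Nat.pos_iff_ne_zero, List.countP_pos_iff] at hcnt
    obtain ⟨w, hw, hpre⟩ := hcnt
    exact ⟨w, hw, by rw [pvC_slice_iff w level hlev k.toList hk]; exact hpre⟩

theorem pvDfin_nodup (words : List String) (level : Int) :
    (pvBCounts words level).keys.Nodup := by
  rw [pvBCounts]
  have : PySem.Dict.empty (κ := String) (ν := Int) |>.keys.Nodup := by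
    simp [PySem.Dict.empty, PySem.Dict.keys]
  generalize PySem.Dict.empty = d at this ⊢
  induction words generalizing d with
  | nil => exact this
  | cons w rest ih => exact ih _ (pvBWord_nodup _ _ _ this)

theorem pvStepB_cond (k b : String) :
    (PySem.Str.len b < PySem.Str.len k ∨
      (PySem.Str.len k = PySem.Str.len b ∧ k.toList < b.toList)) ↔ pvLtP k.toList b.toList := by
  rw [PySem.Str.len_eq, PySem.Str.len_eq, pvLtP]
  constructor
  · rintro (h | ⟨h, h'⟩)
    · left; exact_mod_cast h
    · right; exact ⟨by exact_mod_cast h, h'⟩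
  · rintro (h | ⟨h, h'⟩)
    · left; exact_mod_cast h
    · right; exact ⟨by exact_mod_cast h, h'⟩

theorem pvFoldB (l : List (String × Int)) (b : String) :
    ((l.foldl pvStepB b) = b ∨ ∃ c, ((l.foldl pvStepB b), c) ∈ l ∧ 3 ≤ c) ∧
    (∀ kc ∈ l, 3 ≤ kc.2 → ¬ pvLtP kc.1.toList (l.foldl pvStepB b).toList) ∧
    ((l.foldl pvStepB b) = b ∨ pvLtP (l.foldl pvStepB b).toList b.toList) := by
  induction l generalizing b with
  | nil => exact ⟨Or.inl rfl, by simp, Or.inl rfl⟩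
  | cons kc t ih =>
    obtain ⟨k, c⟩ := kc
    rw [List.foldl_cons]
    obtain ⟨ih1, ih2, ih3⟩ := ih (pvStepB b (k, c))
    by_cases hcond : 3 ≤ c ∧ (PySem.Str.len b < PySem.Str.len k ∨
        (PySem.Str.len k = PySem.Str.len b ∧ k.toList < b.toList))
    · have hb' : pvStepB b (k, c) = k := by rw [pvStepB, if_pos hcond]
      have hkb : pvLtP k.toList b.toList := (pvStepB_cond k b).mp hcond.2
      rw [hb'] at ih1 ih2 ih3 ⊢
      refine ⟨?_, ?_, ?_⟩
      · rcases ih1 with h | ⟨c', hc', h3⟩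
        · exact Or.inr ⟨c, by rw [h]; exact ⟨List.mem_cons_self, hcond.1⟩⟩
        · exact Or.inr ⟨c', List.mem_cons_of_mem _ hc', h3⟩
      · rintro ⟨k', c'⟩ hmem h3
        rcases List.mem_cons.mp hmem with he | hmem'
        · rw [Prod.mk.injEq] at he
          obtain ⟨rfl, rfl⟩ := he
          rcases ih3 with h | h
          · rw [h]; exact pvLtP_irrefl _
          · intro hlt
            exact pvLtP_irrefl _ (pvLtP_trans hlt h)
        · exact ih2 _ hmem' h3
      · rcases ih3 with h | h
        · rw [h]; exact Or.inr hkb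
        · exact Or.inr (pvLtP_trans h hkb)
    · have hb' : pvStepB b (k, c) = b := by rw [pvStepB, if_neg hcond]
      rw [hb'] at ih1 ih2 ih3 ⊢
      refine ⟨?_, ?_, ?_⟩
      · rcases ih1 with h | ⟨c', hc', h3⟩
        · exact Or.inl h
        · exact Or.inr ⟨c', List.mem_cons_of_mem _ hc', h3⟩
      · rintro ⟨k', c'⟩ hmem h3
        rcases List.mem_cons.mp hmem with he | hmem'
        · rw [Prod.mk.injEq] at he
          obtain ⟨rfl, rfl⟩ := he
          have hnkb : ¬ pvLtP k'.toList b.toList := by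
            intro hlt
            exact hcond ⟨h3, (pvStepB_cond k' b).mpr hlt⟩
          rcases ih3 with h | h
          · rw [h]; exact hnkb
          · intro hlt
            exact hnkb (pvLtP_trans hlt h)
        · exact ih2 _ hmem' h3
      · exact ih3

theorem pvB_best (words : List String) (level : Int) (hlev : 0 ≤ level) :
    pvIsBest words level ((find_common_prefix_alt words level).toList) := by
  have hnd := pvDfin_nodup words level
  obtain ⟨f1, f2, _⟩ := pvFoldB (pvBCounts words level).items ""
  have halt : find_common_prefix_alt words level =
      (pvBCounts words level).items.foldl pvStepB "" := rfl
  constructor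
  · rcases f1 with h | ⟨c, hmem, h3⟩
    · left; rw [halt, h]; simp
    · right
      have hget := PySem.Dict.get?_of_mem_items _ hmem hnd
      have hcont : (pvBCounts words level).contains
          (List.foldl pvStepB "" (pvBCounts words level).items) = true := by
        rw [PySem.Dict.contains_eq_isSome_get?, hget]; rfl
      obtain ⟨hk, _⟩ := (pvDfin_contains words level hlev
        (List.foldl pvStepB "" (pvBCounts words level).items)).mp hcont
      have hgd := PySem.Dict.getD_of_get?_eq_some (pvBCounts words level) 0 hget
      rw [pvDfin_getD words level hlev
        (List.foldl pvStepB "" (pvBCounts words level).items) hk] at hgd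
      rw [halt]
      refine ⟨hk, ?_⟩
      omega
  · intro p hp
    have hk' : (String.ofList p).toList ≠ [] := by
      rw [String.toList_ofList]; exact hp.1
    have hcont : (pvBCounts words level).contains (String.ofList p) = true := by
      rw [pvDfin_contains words level hlev]
      exact ⟨hk', by rw [String.toList_ofList]; have := hp.2; omega⟩
    rw [PySem.Dict.contains_eq_isSome_get?] at hcont
    obtain ⟨v, hv⟩ := Option.isSome_iff_exists.mp hcont
    have hmem := PySem.Dict.mem_items_of_get?_eq_some _ hv
    have hgd := PySem.Dict.getD_of_get?_eq_some _ 0 hv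
    rw [pvDfin_getD words level hlev _ hk', String.toList_ofList] at hgd
    have h3 : 3 ≤ v := by rw [← hgd]; exact_mod_cast hp.2
    have := f2 _ hmem h3
    rw [String.toList_ofList] at this
    rw [halt]
    exact this

-- ===== VERDICT (by name: the statement is the Claim_ definition above) =====
theorem find_common_prefix_spec : Claim_equal_find_common_prefix := by
  intro words level _ hpre
  unfold Spec_find_common_prefix Pre_find_common_prefix at *
  have hA := pvA_best (pvMaxLen words - level).toNat words level hpre le_rfl
  have hB := pvB_best words level hpre
  exact String.toList_inj.mp (pvBest_unique hA hB)
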